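-- pv_equiv track=rewrite | github.com/Knife14/Basic_by_Python | had_exams/ContinuousPeriod.py | ContinuousPeriod
-- ===== SOURCE A (Python) =====
-- def ContinuousPeriod(n: int, m: int, data: list):
--     res = 0
--
--     cnt = [0] * 10
--     cnt[data[0]] = 1  # 记录出现的次数
--
--     high = 1  # 双指针
--     for low in range(1, n + 1):
--         if high <= n and cnt[data[high - 1]] < m:
--             high += 1
--             # 若一直遍历到 high > n 则意味着没有出现符合条件的区间
--             while high <= n:
--                 cnt[data[high - 1]] += 1
--                 # 当出现次数满足不小于m时，退出循环
--                 if cnt[data[high - 1]] >= m: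
--                     break
--                 high += 1
--         # 子集求法：最小区间不变，在最后逐渐 + 1
--         # 可换算为 n - high + 1
--         res += (n - high + 1)
--         cnt[data[low - 1]] -= 1  # ？？？
--
--     return res
-- ===== SOURCE B (Python) =====
-- def ContinuousPeriod(n: int, m: int, data: list):
--     # For each start i, scan right with a fresh digit counter until some
--     # digit's count reaches m; every extension of that window also qualifies.
--     res = 0
--     for i in range(n):
--         cnt = [0] * 10
--         for j in range(i, n):
--             cnt[data[j]] += 1
--             if cnt[data[j]] >= m:
--                 res += n - j
--                 break
--     return res
-- ===== Notes on version B (the rewrite author's own statement) =====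
-- stated objective: simpler
-- what changed: Replaced the shared-state two-pointer window (one counter array carried across all starts, with a seeded first element and a lagging high pointer) by an independent per-start scan with a fresh counter that stops as soon as some digit count reaches m.
-- intended difference: For m <= 0 with n >= 2 every nonempty subarray trivially contains a digit at least m times, so B returns the intended count n*(n+1)//2, while A's window check misbehaves and returns an inflated artefact (e.g. 4 instead of 3 for n=2). — e.g. on ContinuousPeriod(2, 0, [0, 0]): A returns 4, B returns 3
import Mathlib
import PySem

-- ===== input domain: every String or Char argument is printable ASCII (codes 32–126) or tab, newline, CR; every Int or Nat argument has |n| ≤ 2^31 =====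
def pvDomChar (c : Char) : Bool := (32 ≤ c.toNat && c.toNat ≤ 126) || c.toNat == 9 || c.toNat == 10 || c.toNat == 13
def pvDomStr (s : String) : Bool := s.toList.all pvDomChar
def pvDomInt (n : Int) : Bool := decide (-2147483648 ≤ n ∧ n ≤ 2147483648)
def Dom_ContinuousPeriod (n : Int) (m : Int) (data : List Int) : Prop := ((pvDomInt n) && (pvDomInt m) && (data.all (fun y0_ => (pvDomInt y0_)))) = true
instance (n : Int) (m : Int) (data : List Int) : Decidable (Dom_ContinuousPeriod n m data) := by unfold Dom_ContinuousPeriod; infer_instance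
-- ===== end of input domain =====

-- B replaces A's shared-state two-pointer window by an independent per-start scan with a
-- fresh digit counter (objective: simpler); for m ≤ 0 (n ≥ 2) B returns the intended
-- n*(n+1)/2 where A returns an inflated artefact (see D_ below).


-- ===== PORT A =====
-- Shared index helpers: Python's `cnt[x]` on the length-10 counter list (exact for
-- -10 ≤ x ≤ 9, the only values Pre_ admits: a negative in-range index wraps by +10,
-- which is x % 10 here) and `data[i]` for 0 ≤ i < len(data) (guaranteed by Pre_).
def pvDig (x : Int) : Nat := (x % 10).toNat

def pvCGet (cnt : List Int) (x : Int) : Int := cnt.getD (pvDig x) 0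

def pvCBump (cnt : List Int) (x : Int) (d : Int) : List Int :=
  cnt.set (pvDig x) (pvCGet cnt x + d)

def pvDGet (data : List Int) (i : Int) : Int := data.getD i.toNat 0

-- the inner `while high <= n:` loop of A, entered after `high += 1`
def pvAdvA (n m : Int) (data : List Int) : Nat → List Int → Int → List Int × Int
  | 0, cnt, high => (cnt, high)
  | fuel+1, cnt, high =>
    if high ≤ n then
      let c := pvCBump cnt (pvDGet data (high - 1)) 1
      if m ≤ pvCGet c (pvDGet data (high - 1)) then (c, high)
      else pvAdvA n m data fuel c (high + 1)
    else (cnt, high)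

-- one iteration of A's `for low in range(1, n + 1):` body; state = (res, cnt, high)
def pvStepA (n m : Int) (data : List Int) (s : Int × List Int × Int) (low : Int) :
    Int × List Int × Int :=
  let res := s.1
  let cnt := s.2.1
  let high := s.2.2
  let ch : List Int × Int :=
    if high ≤ n then
      if pvCGet cnt (pvDGet data (high - 1)) < m then
        pvAdvA n m data (n + 1 - high).toNat cnt (high + 1)
      else (cnt, high)
    else (cnt, high)
  (res + (n - ch.2 + 1), pvCBump ch.1 (pvDGet data (low - 1)) (-1), ch.2)

def ContinuousPeriod (n : Int) (m : Int) (data : List Int) : Int :=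
  let cnt0 := (List.replicate 10 (0 : Int)).set (pvDig (pvDGet data 0)) 1
  ((PySem.List.pyRange 1 (n + 1) 1).foldl (pvStepA n m data) (0, cnt0, 1)).1

-- ===== PORT B =====
-- B's inner `for j in range(i, n):` scan with its early `break`
def pvScanB (n m : Int) (data : List Int) : Nat → List Int → Int → Int
  | 0, _, _ => 0
  | fuel+1, cnt, j =>
    if j < n then
      let c := pvCBump cnt (pvDGet data j) 1
      if m ≤ pvCGet c (pvDGet data j) then n - j
      else pvScanB n m data fuel c (j + 1)
    else 0

def ContinuousPeriod_alt (n : Int) (m : Int) (data : List Int) : Int :=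
  (PySem.List.pyRange 0 n 1).foldl
    (fun res i => res + pvScanB n m data (n - i).toNat (List.replicate 10 (0 : Int)) i) 0

-- ===== PRECONDITION & SPEC =====
-- Exactly where A returns normally: A always reads data[0] (IndexError on []), indexes
-- the length-10 counter with data[0..n-1] (IndexError unless each is in -10..9), and
-- reads data positions up to n-1 (IndexError if n > len(data)).
def Pre_ContinuousPeriod (n : Int) (m : Int) (data : List Int) : Prop :=
  data ≠ [] ∧ n ≤ (data.length : Int) ∧
    ∀ x ∈ data.take (max n.toNat 1), -10 ≤ x ∧ x ≤ 9

instance (n : Int) (m : Int) (data : List Int) : Decidable (Pre_ContinuousPeriod n m data) := by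
  unfold Pre_ContinuousPeriod; infer_instance

def pvWitness_ContinuousPeriod : Int × Int × List Int := (2, 2, [3, 3])

-- For m ≤ 0 with n ≥ 2 every nonempty subarray trivially contains a digit at least m
-- times, so B returns the intended count n*(n+1)/2, while A's window check misbehaves
-- and returns an inflated artefact (e.g. 4 instead of 3 for n = 2, data = [0, 0]).
def D_ContinuousPeriod (n : Int) (m : Int) (data : List Int) : Prop := m ≤ 0 ∧ 2 ≤ n

instance (n : Int) (m : Int) (data : List Int) : Decidable (D_ContinuousPeriod n m data) := by
  unfold D_ContinuousPeriod; infer_instance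

def Spec_ContinuousPeriod (n : Int) (m : Int) (data : List Int) (out : Int) : Prop :=
  ¬ D_ContinuousPeriod n m data → out = ContinuousPeriod_alt n m data

instance (n : Int) (m : Int) (data : List Int) (out : Int) : Decidable (Spec_ContinuousPeriod n m data out) := by
  unfold Spec_ContinuousPeriod; infer_instance

def pvDiffWitness_ContinuousPeriod : Int × Int × List Int := (2, 0, [0, 0])

def pvDiffWitnessOut_ContinuousPeriod : Int × Int := (4, 3)

-- ===== CLAIM (what is proved, stated in full; the proofs are below) =====
def Claim_unchanged_ContinuousPeriod : Prop := ∀ (n : Int) (m : Int) (data : List Int), Dom_ContinuousPeriod n m data → Pre_ContinuousPeriod n m data → Spec_ContinuousPeriod n m data (ContinuousPeriod n m data)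

def Claim_changed_ContinuousPeriod : Prop := Dom_ContinuousPeriod (pvDiffWitness_ContinuousPeriod.1) (pvDiffWitness_ContinuousPeriod.2.1) (pvDiffWitness_ContinuousPeriod.2.2) ∧ Pre_ContinuousPeriod (pvDiffWitness_ContinuousPeriod.1) (pvDiffWitness_ContinuousPeriod.2.1) (pvDiffWitness_ContinuousPeriod.2.2) ∧ D_ContinuousPeriod (pvDiffWitness_ContinuousPeriod.1) (pvDiffWitness_ContinuousPeriod.2.1) (pvDiffWitness_ContinuousPeriod.2.2) ∧ ContinuousPeriod (pvDiffWitness_ContinuousPeriod.1) (pvDiffWitness_ContinuousPeriod.2.1) (pvDiffWitness_ContinuousPeriod.2.2) = pvDiffWitnessOut_ContinuousPeriod.1 ∧ ContinuousPeriod_alt (pvDiffWitness_ContinuousPeriod.1) (pvDiffWitness_ContinuousPeriod.2.1) (pvDiffWitness_ContinuousPeriod.2.2) = pvDiffWitnessOut_ContinuousPeriod.2 ∧ pvDiffWitnessOut_ContinuousPeriod.1 ≠ pvDiffWitnessOut_ContinuousPeriod.2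

def Claim_exact_ContinuousPeriod : Prop := ∀ (n : Int) (m : Int) (data : List Int), Dom_ContinuousPeriod n m data → Pre_ContinuousPeriod n m data → D_ContinuousPeriod n m data → ContinuousPeriod n m data ≠ ContinuousPeriod_alt n m data

-- ===== LEMMAS AND PROOFS =====

-- number of positions k with a ≤ k < b whose data digit is v
def pvCnt (data : List Int) (a b : Nat) (v : Nat) : Nat :=
  ((data.take b).drop a).countP (fun x => pvDig x == v)

-- "window [a, b) contains some digit at least m times"
def pvGoodB (m : Int) (data : List Int) (a b : Nat) : Bool :=
  (List.range 10).any (fun v => decide (m ≤ (pvCnt data a b v : Int)))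

-- first b in (j, N] with good window [a, b), else N+1
def pvBnd (m : Int) (data : List Int) (N a j : Nat) : Nat :=
  if j < N then (if pvGoodB m data a (j + 1) then j + 1 else pvBnd m data N a (j + 1))
  else N + 1
termination_by N - j

-- B's contribution for start a, and the sum of contributions for starts a..N-1
def pvBval (n m : Int) (data : List Int) (N a : Nat) : Int :=
  if pvBnd m data N a a ≤ N then n + 1 - (pvBnd m data N a a : Int) else 0

def pvBsum (n m : Int) (data : List Int) (N a : Nat) : Int :=
  if a < N then pvBval n m data N a + pvBsum n m data N (a + 1) else 0
termination_by N - a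

-- cnt list represents the counting function f
def pvRep (cnt : List Int) (f : Nat → Int) : Prop :=
  cnt.length = 10 ∧ ∀ v, v < 10 → cnt.getD v 0 = f v

theorem pvGoodB_iff (m : Int) (data : List Int) (a b : Nat) :
    pvGoodB m data a b = true ↔ ∃ v, v < 10 ∧ m ≤ (pvCnt data a b v : Int) := by
  simp [pvGoodB]

theorem pvGoodB_false_iff (m : Int) (data : List Int) (a b : Nat) :
    pvGoodB m data a b = false ↔ ∀ v, v < 10 → (pvCnt data a b v : Int) < m := by
  rw [← Bool.not_eq_true, pvGoodB_iff]
  simp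

theorem pvDig_lt (x : Int) : pvDig x < 10 := by
  have h1 : 0 ≤ x % 10 := Int.emod_nonneg x (by norm_num)
  have h2 : x % 10 < 10 := Int.emod_lt_of_pos x (by norm_num)
  unfold pvDig
  omega

theorem pvRep_get (cnt : List Int) (f : Nat → Int) (h : pvRep cnt f) (x : Int) :
    pvCGet cnt x = f (pvDig x) := h.2 _ (pvDig_lt x)

theorem pvRep_bump (cnt : List Int) (f : Nat → Int) (h : pvRep cnt f) (x d : Int) :
    pvRep (pvCBump cnt x d) (fun v => if v = pvDig x then f (pvDig x) + d else f v) := by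
  obtain ⟨hlen, hget⟩ := h
  have hi : pvDig x < cnt.length := by rw [hlen]; exact pvDig_lt x
  refine ⟨by simp [pvCBump, hlen], ?_⟩
  intro v hv
  by_cases hvx : v = pvDig x
  · subst hvx
    simp [pvCBump, List.getD, List.getElem?_set_self hi, pvRep_get cnt f ⟨hlen, hget⟩ x]
  · simp [pvCBump, List.getD, List.getElem?_set_ne (fun h => hvx h.symm), hvx]
    simpa [List.getD] using hget v hv

theorem pvCnt_empty (data : List Int) (a b v : Nat) (h : b ≤ a) : pvCnt data a b v = 0 := by
  unfold pvCnt
  rw [List.drop_eq_nil_of_le (by simpa using Nat.le_trans (Nat.min_le_left _ _) h)]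
  rfl

theorem pvCnt_succ (data : List Int) (a j v : Nat) (ha : a ≤ j) (hj : j < data.length) :
    pvCnt data a (j + 1) v = pvCnt data a j v + (if pvDig (data.getD j 0) = v then 1 else 0) := by
  unfold pvCnt
  rw [List.take_add_one, List.getElem?_eq_getElem hj]
  rw [List.drop_append_of_le_length (by simp [List.length_take]; omega)]
  rw [List.countP_append]
  have hg : data.getD j 0 = data[j] := List.getD_eq_getElem data 0 hj
  rw [hg]
  simp [List.countP_cons]

theorem pvCnt_drop_head (data : List Int) (a b v : Nat) (hab : a < b) (ha : a < data.length) :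
    pvCnt data a b v = (if pvDig (data.getD a 0) = v then 1 else 0) + pvCnt data (a + 1) b v := by
  unfold pvCnt
  have hlt : a < (data.take b).length := by simp [List.length_take]; omega
  rw [List.drop_eq_getElem_cons hlt, List.countP_cons, List.getElem_take]
  have hg : data.getD a 0 = data[a] := List.getD_eq_getElem data 0 ha
  rw [hg]
  split <;> simp_all <;> omega

theorem pvGood_mono_b (m : Int) (data : List Int) (a b b' : Nat) (h : pvGoodB m data a b = true)
    (hb : b ≤ b') : pvGoodB m data a b' = true := by
  rw [pvGoodB_iff] at h ⊢
  obtain ⟨v, hv, hc⟩ := h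
  refine ⟨v, hv, le_trans hc ?_⟩
  have hsub : ((data.take b).drop a).Sublist ((data.take b').drop a) :=
    ((List.take_prefix_take_left hb).drop a).sublist
  exact_mod_cast hsub.countP_le

theorem pvGood_anti_a (m : Int) (data : List Int) (a b : Nat)
    (h : pvGoodB m data (a + 1) b = true) : pvGoodB m data a b = true := by
  rw [pvGoodB_iff] at h ⊢
  obtain ⟨v, hv, hc⟩ := h
  refine ⟨v, hv, le_trans hc ?_⟩
  have hsub : ((data.take b).drop (a + 1)).Sublist ((data.take b).drop a) := by
    have heq : (data.take b).drop (a + 1) = ((data.take b).drop a).drop 1 := by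
      rw [List.drop_drop]
    rw [heq]
    exact List.drop_sublist _ _
  exact_mod_cast hsub.countP_le

theorem pvGood_empty (m : Int) (data : List Int) (a b : Nat) (hm : 1 ≤ m) (h : b ≤ a) :
    pvGoodB m data a b = false := by
  rw [pvGoodB_false_iff]
  intro v _
  rw [pvCnt_empty data a b v h]
  omega

-- with no good window [a, j), the freshly extended window [a, j+1) is good
-- iff the count of the just-added digit reached m
theorem pvGood_last (m : Int) (data : List Int) (a j : Nat) (ha : a ≤ j) (hj : j < data.length)
    (hng : pvGoodB m data a j = false) :
    (m ≤ (pvCnt data a (j + 1) (pvDig (data.getD j 0)) : Int)) ↔ pvGoodB m data a (j + 1) = true := by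
  rw [pvGoodB_iff]
  constructor
  · intro h
    exact ⟨_, pvDig_lt _, h⟩
  · rintro ⟨v, hv, hc⟩
    rw [pvGoodB_false_iff] at hng
    have hstep := pvCnt_succ data a j v ha hj
    have hlt := hng v hv
    by_cases hvd : pvDig (data.getD j 0) = v
    · rw [hvd]; exact hc
    · rw [hstep, if_neg hvd] at hc
      push_cast at hc
      omega

theorem pvBnd_gt (m : Int) (data : List Int) (N a j : Nat) (hj : j ≤ N) : j < pvBnd m data N a j := by
  fun_induction pvBnd m data N a j with
  | case1 j h hg => omega
  | case2 j h hg ih => have := ih (by omega); omega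
  | case3 j h => omega

theorem pvBnd_le (m : Int) (data : List Int) (N a j : Nat) : pvBnd m data N a j ≤ N + 1 := by
  fun_induction pvBnd m data N a j with
  | case1 j h hg => omega
  | case2 j h hg ih => exact ih
  | case3 j h => omega

theorem pvBnd_notgood (m : Int) (data : List Int) (N a j : Nat)
    (hng : pvGoodB m data a j = false) :
    ∀ b, j ≤ b → b < pvBnd m data N a j → pvGoodB m data a b = false := by
  revert hng
  fun_induction pvBnd m data N a j with
  | case1 j h hg =>
    intro hng b hjb hb
    have hbj : b = j := by omega
    subst hbj; exact hng
  | case2 j h hg ih =>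
    intro hng b hjb hb
    by_cases e : b = j
    · subst e; exact hng
    · exact ih (by simpa using hg) b (by omega) hb
  | case3 j h =>
    intro hng b hjb hb
    have hbj : b = j := by omega
    subst hbj; exact hng

theorem pvBnd_irrel (m : Int) (data : List Int) (N a j j' : Nat) (hj : j' ≤ j)
    (hng : pvGoodB m data a j = false) : pvBnd m data N a j' = pvBnd m data N a j := by
  revert hj
  fun_induction pvBnd m data N a j' with
  | case1 j' h hg =>
    intro hj
    by_cases e : j' = j
    · subst e
      conv_rhs => rw [pvBnd]
      simp [h, hg]
    · have : pvGoodB m data a j = true := pvGood_mono_b m data a (j' + 1) j hg (by omega)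
      rw [hng] at this
      exact absurd this (by simp)
  | case2 j' h hg ih =>
    intro hj
    by_cases e : j' = j
    · subst e
      conv_rhs => rw [pvBnd]
      simp [h, hg]
    · exact ih (by omega)
  | case3 j' h =>
    intro hj
    conv_rhs => rw [pvBnd]
    simp [show ¬ j < N by omega]

theorem pvDGet_natCast (data : List Int) (k : Nat) : pvDGet data ((k : Nat) : Int) = data.getD k 0 := by
  simp [pvDGet]

theorem pvRep_inc (data : List Int) (a j : Nat) (cnt : List Int) (ha : a ≤ j)
    (hj : j < data.length)
    (hrep : pvRep cnt (fun v => (pvCnt data a j v : Int))) :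
    pvRep (pvCBump cnt (data.getD j 0) 1) (fun v => (pvCnt data a (j + 1) v : Int)) := by
  have hb := pvRep_bump cnt _ hrep (data.getD j 0) 1
  refine ⟨hb.1, ?_⟩
  intro v hv
  rw [hb.2 v hv]
  beta_reduce
  rw [pvCnt_succ data a j v ha hj]
  by_cases hvx : v = pvDig (data.getD j 0)
  · rw [if_pos hvx, if_pos hvx.symm]
    push_cast
    rw [hvx]
  · rw [if_neg hvx, if_neg (fun h => hvx h.symm)]
    push_cast
    ring

theorem pvAdvA_spec (n m : Int) (data : List Int) (N : Nat) (hN : (N : Int) = n)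
    (hlen : N ≤ data.length) :
    ∀ (fuel : Nat) (a hn : Nat) (cnt : List Int), a ≤ hn → hn ≤ N → N + 1 - hn ≤ fuel →
      pvRep cnt (fun v => (pvCnt data a hn v : Int)) → pvGoodB m data a hn = false →
      ∃ cnt', pvAdvA n m data fuel cnt ((hn : Int) + 1) = (cnt', ((pvBnd m data N a hn : Nat) : Int))
        ∧ pvRep cnt' (fun v => (pvCnt data a (min (pvBnd m data N a hn) N) v : Int)) := by
  intro fuel
  induction fuel with
  | zero => intro a hn cnt hahn hhnN hfuel hrep hng; omega
  | succ fuel ih =>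
    intro a hn cnt hahn hhnN hfuel hrep hng
    by_cases hlt : hn < N
    · -- high = hn+1 ≤ n: extend the window by data[hn]
      have hcond : ((hn : Int) + 1) ≤ n := by rw [← hN]; exact_mod_cast hlt
      have hidx : ((hn : Int) + 1 - 1) = ((hn : Nat) : Int) := by ring
      have hlen' : hn < data.length := by omega
      have hrep' := pvRep_inc data a hn cnt hahn hlen' hrep
      have hval : pvCGet (pvCBump cnt (data.getD hn 0) 1) (data.getD hn 0)
          = (pvCnt data a (hn + 1) (pvDig (data.getD hn 0)) : Int) := pvRep_get _ _ hrep' _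
      rw [pvAdvA]
      rw [if_pos hcond, hidx, pvDGet_natCast]
      by_cases hg : pvGoodB m data a (hn + 1) = true
      · have hm : m ≤ pvCGet (pvCBump cnt (data.getD hn 0) 1) (data.getD hn 0) := by
          rw [hval]
          exact (pvGood_last m data a hn hahn hlen' hng).mpr hg
        rw [if_pos hm]
        have hbnd : pvBnd m data N a hn = hn + 1 := by rw [pvBnd]; simp [hlt, hg]
        refine ⟨pvCBump cnt (data.getD hn 0) 1, ?_, ?_⟩
        · simp [hbnd]
        · rw [hbnd, min_eq_left (by omega)]
          exact hrep'
      · have hm : ¬ m ≤ pvCGet (pvCBump cnt (data.getD hn 0) 1) (data.getD hn 0) := by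
          rw [hval]
          intro hmm
          exact hg ((pvGood_last m data a hn hahn hlen' hng).mp hmm)
        rw [if_neg hm]
        have hg' : pvGoodB m data a (hn + 1) = false := by simpa using hg
        have hbnd : pvBnd m data N a hn = pvBnd m data N a (hn + 1) := by
          rw [pvBnd]; simp [hlt, hg]
        obtain ⟨cnt', heq, hrep''⟩ := ih a (hn + 1) (pvCBump cnt (data.getD hn 0) 1)
          (by omega) (by omega) (by omega) hrep' hg'
        refine ⟨cnt', ?_, ?_⟩
        · rw [hbnd, ← heq]
          congr 1
        · rw [hbnd]; exact hrep''
    · -- hn = N: high = N+1 > n, loop does not run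
      have hhn : hn = N := by omega
      have hcond : ¬ ((hn : Int) + 1) ≤ n := by rw [← hN]; push_cast; omega
      rw [pvAdvA, if_neg hcond]
      have hbnd : pvBnd m data N a hn = hn + 1 := by
        rw [pvBnd]; simp [show ¬ hn < N by omega]; omega
      refine ⟨cnt, ?_, ?_⟩
      · simp [hbnd]
      · rw [hbnd, min_eq_right (by omega), ← hhn]
        exact hrep

theorem pvScanB_spec (n m : Int) (data : List Int) (N : Nat) (hN : (N : Int) = n)
    (hlen : N ≤ data.length) :
    ∀ (fuel : Nat) (a jn : Nat) (cnt : List Int), a ≤ jn → jn ≤ N → N - jn ≤ fuel →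
      pvRep cnt (fun v => (pvCnt data a jn v : Int)) → pvGoodB m data a jn = false →
      pvScanB n m data fuel cnt (jn : Int) =
        (if pvBnd m data N a jn ≤ N then n + 1 - (pvBnd m data N a jn : Int) else 0) := by
  intro fuel
  induction fuel with
  | zero =>
    intro a jn cnt hajn hjnN hfuel hrep hng
    have hjn : jn = N := by omega
    have hbnd : pvBnd m data N a jn = jn + 1 := by
      rw [pvBnd]; simp [show ¬ jn < N by omega]; omega
    rw [pvScanB, hbnd, if_neg (by omega)]
  | succ fuel ih =>
    intro a jn cnt hajn hjnN hfuel hrep hng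
    by_cases hlt : jn < N
    · have hcond : ((jn : Int)) < n := by rw [← hN]; exact_mod_cast hlt
      have hlen' : jn < data.length := by omega
      have hrep' := pvRep_inc data a jn cnt hajn hlen' hrep
      have hval : pvCGet (pvCBump cnt (data.getD jn 0) 1) (data.getD jn 0)
          = (pvCnt data a (jn + 1) (pvDig (data.getD jn 0)) : Int) := pvRep_get _ _ hrep' _
      rw [pvScanB, if_pos hcond, pvDGet_natCast]
      by_cases hg : pvGoodB m data a (jn + 1) = true
      · have hm : m ≤ pvCGet (pvCBump cnt (data.getD jn 0) 1) (data.getD jn 0) := by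
          rw [hval]
          exact (pvGood_last m data a jn hajn hlen' hng).mpr hg
        rw [if_pos hm]
        have hbnd : pvBnd m data N a jn = jn + 1 := by rw [pvBnd]; simp [hlt, hg]
        rw [hbnd, if_pos (by omega)]
        push_cast; ring
      · have hm : ¬ m ≤ pvCGet (pvCBump cnt (data.getD jn 0) 1) (data.getD jn 0) := by
          rw [hval]
          intro hmm
          exact hg ((pvGood_last m data a jn hajn hlen' hng).mp hmm)
        rw [if_neg hm]
        have hg' : pvGoodB m data a (jn + 1) = false := by simpa using hg
        have hbnd : pvBnd m data N a jn = pvBnd m data N a (jn + 1) := by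
          rw [pvBnd]; simp [hlt, hg]
        have hrec := ih a (jn + 1) (pvCBump cnt (data.getD jn 0) 1)
          (by omega) (by omega) (by omega) hrep' hg'
        rw [hbnd, ← hrec]
        congr 1
    · have hjn : jn = N := by omega
      have hcond : ¬ ((jn : Int)) < n := by rw [← hN]; push_cast; omega
      have hbnd : pvBnd m data N a jn = jn + 1 := by
        rw [pvBnd]; simp [show ¬ jn < N by omega]; omega
      rw [pvScanB, if_neg hcond, hbnd, if_neg (by omega)]

theorem pvRep_dec (data : List Int) (a W : Nat) (cnt : List Int) (haW : a < W)
    (hW : W ≤ data.length)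
    (h : pvRep cnt (fun v => (pvCnt data a W v : Int))) :
    pvRep (pvCBump cnt (pvDGet data (((a : Nat) : Int) + 1 - 1)) (-1))
      (fun v => (pvCnt data (a + 1) W v : Int)) := by
  have hidx : (((a : Nat) : Int) + 1 - 1) = ((a : Nat) : Int) := by ring
  rw [hidx, pvDGet_natCast]
  have hb := pvRep_bump cnt _ h (data.getD a 0) (-1)
  refine ⟨hb.1, ?_⟩
  intro v hv
  rw [hb.2 v hv]
  beta_reduce
  have hstep := pvCnt_drop_head data a W v haW (by omega)
  by_cases hvx : v = pvDig (data.getD a 0)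
  · rw [if_pos hvx]
    have h2 := pvCnt_drop_head data a W (pvDig (data.getD a 0)) haW (by omega)
    rw [if_pos rfl] at h2
    rw [hvx, h2]
    push_cast; ring
  · rw [if_neg hvx]
    rw [if_neg (fun h => hvx h.symm)] at hstep
    rw [hstep]
    push_cast; ring

theorem pvGetD_set_self (l : List Int) (i : Nat) (w : Int) (h : i < l.length) :
    (l.set i w).getD i 0 = w := by
  simp [List.getD, List.getElem?_set_self h]

theorem pvGetD_set_ne (l : List Int) (i v : Nat) (w : Int) (h : i ≠ v) :
    (l.set i w).getD v 0 = l.getD v 0 := by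
  simp [List.getD, List.getElem?_set_ne h]

theorem pvCGet_replicate (x : Int) : pvCGet (List.replicate 10 (0 : Int)) x = 0 := by
  have h := pvDig_lt x
  unfold pvCGet
  generalize pvDig x = i at h ⊢
  interval_cases i <;> rfl

theorem pvCGet_set_self (x w : Int) :
    pvCGet ((List.replicate 10 (0 : Int)).set (pvDig x) w) x = w := by
  have h := pvDig_lt x
  unfold pvCGet
  generalize pvDig x = i at h ⊢
  interval_cases i <;> rfl

theorem pvRep_fresh (data : List Int) (a : Nat) :
    pvRep (List.replicate 10 (0 : Int)) (fun v => (pvCnt data a a v : Int)) := by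
  refine ⟨by simp, ?_⟩
  intro v hv
  beta_reduce
  rw [pvCnt_empty data a a v le_rfl]
  interval_cases v <;> rfl

theorem pvBval_eq (n m : Int) (data : List Int) (N a : Nat) :
    pvBval n m data N a =
      (if pvBnd m data N a a ≤ N then n + 1 - (pvBnd m data N a a : Int) else 0) := rfl

theorem pvFoldA (n m : Int) (data : List Int) (N : Nat) (hN : (N : Int) = n)
    (hlen : N ≤ data.length) (hm : 1 ≤ m) :
    ∀ (k a hn : Nat) (res : Int) (cnt : List Int), k = N - a → a ≤ N → a ≤ hn → 1 ≤ hn →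
      hn ≤ N + 1 →
      pvRep cnt (fun v => (pvCnt data a (min hn N) v : Int)) →
      pvGoodB m data a (min (hn - 1) N) = false →
      ((PySem.List.pyRange ((a : Int) + 1) (n + 1) 1).foldl (pvStepA n m data)
          (res, cnt, ((hn : Nat) : Int))).1 = res + pvBsum n m data N a := by
  intro k
  induction k with
  | zero =>
    intro a hn res cnt hk haN hahn h1hn hhnN hrep hng
    have haN' : a = N := by omega
    rw [PySem.List.pyRange_one_eq_nil (by rw [← hN]; push_cast; omega)]
    rw [pvBsum, if_neg (by omega)]
    simp
  | succ k ih =>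
    intro a hn res cnt hk haN hahn h1hn hhnN hrep hng
    have haltN : a < N := by omega
    rw [PySem.List.pyRange_one_cons (by rw [← hN]; push_cast; omega)]
    rw [List.foldl_cons]
    have hbs : pvBsum n m data N a = pvBval n m data N a + pvBsum n m data N (a + 1) := by
      rw [pvBsum, if_pos haltN]
    have hcast : ((a : Int) + 1 + 1) = (((a + 1 : Nat) : Int) + 1) := by push_cast; ring
    by_cases hhle : hn ≤ N
    · -- high = hn ≤ n at the top of the loop body
      have hcond : ((hn : Nat) : Int) ≤ n := by rw [← hN]; exact_mod_cast hhle
      have hidx : (((hn : Nat) : Int) - 1) = (((hn - 1 : Nat) : Nat) : Int) := by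
        push_cast [Nat.cast_sub h1hn]; ring
      have hmin : min hn N = hn := min_eq_left hhle
      have hmin1 : min (hn - 1) N = hn - 1 := min_eq_left (by omega)
      rw [hmin] at hrep
      rw [hmin1] at hng
      have hread : pvCGet cnt (pvDGet data (((hn : Nat) : Int) - 1))
          = (pvCnt data a hn (pvDig (data.getD (hn - 1) 0)) : Int) := by
        rw [hidx, pvDGet_natCast]
        exact pvRep_get _ _ hrep _
      have hiff : (m ≤ pvCGet cnt (pvDGet data (((hn : Nat) : Int) - 1)))
          ↔ pvGoodB m data a hn = true := by
        by_cases hha : a + 1 ≤ hn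
        · have := pvGood_last m data a (hn - 1) (by omega) (by omega) hng
          rw [hread]
          rw [show hn - 1 + 1 = hn by omega] at this
          exact this
        · have hhna : hn = a := by omega
          rw [hread, hhna]
          constructor
          · intro hc
            rw [pvCnt_empty data a a _ le_rfl] at hc
            omega
          · intro hg
            rw [pvGood_empty m data a a hm le_rfl] at hg
            exact absurd hg (by simp)
      by_cases hg : pvGoodB m data a hn = true
      · -- window already good at the current high: no advance
        have hha : a + 1 ≤ hn := by
          by_contra hc
          have hhna : hn = a := by omega
          rw [hhna, pvGood_empty m data a a hm le_rfl] at hg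
          exact absurd hg (by simp)
        have hnotlt : ¬ pvCGet cnt (pvDGet data (((hn : Nat) : Int) - 1)) < m := by
          rw [not_lt]; exact hiff.mpr hg
        have hstep : pvStepA n m data (res, cnt, ((hn : Nat) : Int)) ((a : Int) + 1)
            = (res + (n - ((hn : Nat) : Int) + 1),
               pvCBump cnt (pvDGet data ((a : Int) + 1 - 1)) (-1), ((hn : Nat) : Int)) := by
          rw [pvStepA]
          simp only [if_pos hcond, if_neg hnotlt]
        rw [hstep]
        have hbnd : pvBnd m data N a a = hn := by
          rw [pvBnd_irrel m data N a (hn - 1) a (by omega) hng]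
          rw [pvBnd]
          rw [if_pos (by omega), show hn - 1 + 1 = hn by omega, if_pos hg]
        have hbv : pvBval n m data N a = n + 1 - ((hn : Nat) : Int) := by
          rw [pvBval_eq, hbnd, if_pos hhle]
        have hrep' := pvRep_dec data a hn cnt (by omega) (by omega) hrep
        have hng' : pvGoodB m data (a + 1) (min (hn - 1) N) = false := by
          rw [min_eq_left (by omega)]
          by_contra hc
          exact absurd (pvGood_anti_a m data a (hn - 1) (by simpa using hc))
            (by simp [hng])
        rw [hcast]
        rw [ih (a + 1) hn (res + (n - ((hn : Nat) : Int) + 1))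
          (pvCBump cnt (pvDGet data ((a : Int) + 1 - 1)) (-1)) (by omega) (by omega)
          (by omega) (by omega) (by omega)
          (by rw [min_eq_left hhle]
              exact_mod_cast hrep') hng']
        rw [hbs, hbv]
        ring
      · -- window not yet good: A advances high with the inner while loop
        have hlt2 : pvCGet cnt (pvDGet data (((hn : Nat) : Int) - 1)) < m := by
          by_contra hc
          exact hg (hiff.mp (by omega))
        have hng2 : pvGoodB m data a hn = false := by simpa using hg
        obtain ⟨cnt2, heq2, hrep2⟩ := pvAdvA_spec n m data N hN (by omega)
          (n + 1 - ((hn : Nat) : Int)).toNat a hn cnt hahn hhle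
          (by rw [← hN]; omega) hrep hng2
        set b := pvBnd m data N a hn with hbdef
        have hbgt : hn < b := pvBnd_gt m data N a hn hhle
        have hble : b ≤ N + 1 := pvBnd_le m data N a hn
        have hstep : pvStepA n m data (res, cnt, ((hn : Nat) : Int)) ((a : Int) + 1)
            = (res + (n - ((b : Nat) : Int) + 1),
               pvCBump cnt2 (pvDGet data ((a : Int) + 1 - 1)) (-1), ((b : Nat) : Int)) := by
          rw [pvStepA]
          simp only [if_pos hcond, if_pos hlt2, heq2]
        rw [hstep]
        have hbnd : pvBnd m data N a a = b := pvBnd_irrel m data N a hn a hahn hng2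
        have hbv : pvBval n m data N a = n - ((b : Nat) : Int) + 1 := by
          rw [pvBval_eq, hbnd]
          by_cases hbN : b ≤ N
          · rw [if_pos hbN]; ring
          · rw [if_neg hbN]
            have hbeq : b = N + 1 := by omega
            rw [hbeq, ← hN]; push_cast; ring
        have hrep' := pvRep_dec data a (min b N) cnt2 (by omega) (by omega) hrep2
        have hngall := pvBnd_notgood m data N a hn hng2
        have hngb : pvGoodB m data a (min (b - 1) N) = false := by
          rw [min_eq_left (by omega)]
          exact hngall (b - 1) (by omega) (by omega)
        have hng' : pvGoodB m data (a + 1) (min (b - 1) N) = false := by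
          by_contra hc
          exact absurd (pvGood_anti_a m data a (min (b - 1) N) (by simpa using hc))
            (by simp [hngb])
        rw [hcast]
        rw [ih (a + 1) b (res + (n - ((b : Nat) : Int) + 1))
          (pvCBump cnt2 (pvDGet data ((a : Int) + 1 - 1)) (-1)) (by omega) (by omega)
          (by omega) (by omega) (by omega) hrep' hng']
        rw [hbs, hbv]
        ring
    · -- high = N + 1: no further good window can start at or after a
      have hhn : hn = N + 1 := by omega
      have hcond : ¬ ((hn : Nat) : Int) ≤ n := by rw [← hN, hhn]; push_cast; omega
      have hmin : min hn N = N := by omega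
      have hmin1 : min (hn - 1) N = N := by omega
      rw [hmin] at hrep
      rw [hmin1] at hng
      have hstep : pvStepA n m data (res, cnt, ((hn : Nat) : Int)) ((a : Int) + 1)
          = (res + (n - ((hn : Nat) : Int) + 1),
             pvCBump cnt (pvDGet data ((a : Int) + 1 - 1)) (-1), ((hn : Nat) : Int)) := by
        rw [pvStepA]
        simp only [if_neg hcond]
      rw [hstep]
      have hbnd : pvBnd m data N a a = N + 1 := by
        rw [pvBnd_irrel m data N a N a (by omega) hng]
        rw [pvBnd, if_neg (by omega)]
      have hbv : pvBval n m data N a = 0 := by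
        rw [pvBval_eq, hbnd, if_neg (by omega)]
      have hzero : n - ((hn : Nat) : Int) + 1 = 0 := by
        rw [hhn, ← hN]; push_cast; ring
      have hrep' := pvRep_dec data a N cnt (by omega) (by omega) hrep
      have hng' : pvGoodB m data (a + 1) (min (hn - 1) N) = false := by
        rw [hmin1]
        by_contra hc
        exact absurd (pvGood_anti_a m data a N (by simpa using hc)) (by simp [hng])
      rw [hcast]
      rw [ih (a + 1) hn (res + (n - ((hn : Nat) : Int) + 1))
        (pvCBump cnt (pvDGet data ((a : Int) + 1 - 1)) (-1)) (by omega) (by omega)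
        (by omega) (by omega) (by omega)
        (by rw [show min hn N = N by omega]; exact hrep') hng']
      rw [hbs, hbv, hzero]
      ring

theorem pvAltB (n m : Int) (data : List Int) (N : Nat) (hN : (N : Int) = n)
    (hlen : N ≤ data.length) (hm : 1 ≤ m) :
    ∀ (k a : Nat) (res : Int), k = N - a → a ≤ N →
      ((PySem.List.pyRange ((a : Nat) : Int) n 1).foldl
          (fun res i => res + pvScanB n m data (n - i).toNat (List.replicate 10 (0 : Int)) i) res)
        = res + pvBsum n m data N a := by
  intro k
  induction k with
  | zero =>
    intro a res hk haN
    rw [PySem.List.pyRange_one_eq_nil (by rw [← hN]; push_cast; omega)]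
    rw [pvBsum, if_neg (by omega)]
    simp
  | succ k ih =>
    intro a res hk haN
    have haltN : a < N := by omega
    rw [PySem.List.pyRange_one_cons (by rw [← hN]; push_cast; omega)]
    rw [List.foldl_cons]
    have hscan : pvScanB n m data (n - ((a : Nat) : Int)).toNat (List.replicate 10 (0 : Int))
        ((a : Nat) : Int) = pvBval n m data N a := by
      rw [pvBval_eq]
      exact pvScanB_spec n m data N hN (by omega) _ a a _ le_rfl (by omega)
        (by rw [← hN]; omega) (pvRep_fresh data a) (pvGood_empty m data a a hm le_rfl)
    rw [hscan]
    have hcast : ((a : Int) + 1) = (((a + 1 : Nat) : Nat) : Int) := by push_cast; ring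
    rw [hcast, ih (a + 1) (res + pvBval n m data N a) (by omega) (by omega)]
    conv_rhs => rw [pvBsum]
    rw [if_pos haltN]
    ring

theorem pvMain (n m : Int) (data : List Int) (hn : 1 ≤ n) (hm : 1 ≤ m)
    (hpre : Pre_ContinuousPeriod n m data) :
    ContinuousPeriod n m data = ContinuousPeriod_alt n m data := by
  obtain ⟨hne, hlenI, _hrange⟩ := hpre
  have hN : ((n.toNat : Nat) : Int) = n := by omega
  have hlen : n.toNat ≤ data.length := by omega
  have hN1 : 1 ≤ n.toNat := by omega
  have hB : ContinuousPeriod_alt n m data = pvBsum n m data n.toNat 0 := by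
    rw [ContinuousPeriod_alt]
    have h := pvAltB n m data n.toNat hN hlen hm n.toNat 0 0 (by omega) (by omega)
    simpa using h
  have hd0 : pvDGet data 0 = data.getD 0 0 := by simp [pvDGet]
  have hrep0 : pvRep ((List.replicate 10 (0 : Int)).set (pvDig (pvDGet data 0)) 1)
      (fun v => (pvCnt data 0 (min 1 n.toNat) v : Int)) := by
    refine ⟨by simp, ?_⟩
    intro v hv
    beta_reduce
    rw [min_eq_left (by omega)]
    have hcnt : pvCnt data 0 1 v
        = (if pvDig (data.getD 0 0) = v then 1 else 0) + pvCnt data 1 1 v :=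
      pvCnt_drop_head data 0 1 v (by omega) (by omega)
    rw [pvCnt_empty data 1 1 v le_rfl] at hcnt
    rw [hcnt, hd0]
    by_cases hvx : v = pvDig (data.getD 0 0)
    · rw [hvx, if_pos rfl]
      rw [pvGetD_set_self _ _ _ (by simp [pvDig_lt])]
      norm_num
    · rw [if_neg (fun h => hvx h.symm)]
      rw [pvGetD_set_ne _ _ _ _ (fun h => hvx h.symm)]
      have h0 := (pvRep_fresh data 0).2 v hv
      rw [show (fun v => ((pvCnt data 0 0 v : Nat) : Int)) v = ((pvCnt data 0 0 v : Nat) : Int) from rfl,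
        pvCnt_empty data 0 0 v le_rfl] at h0
      simpa using h0
  have hng0 : pvGoodB m data 0 (min (1 - 1) n.toNat) = false := by
    rw [show min (1 - 1 : Nat) n.toNat = 0 by simp]
    exact pvGood_empty m data 0 0 hm le_rfl
  have hA : ContinuousPeriod n m data = pvBsum n m data n.toNat 0 := by
    rw [ContinuousPeriod]
    have h := pvFoldA n m data n.toNat hN hlen hm n.toNat 0 1 0
      ((List.replicate 10 (0 : Int)).set (pvDig (pvDGet data 0)) 1)
      (by omega) (by omega) (by omega) (by omega) (by omega) hrep0 hng0
    simpa using h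
  rw [hA, hB]

theorem pvSmall (n m : Int) (data : List Int) (hn : n = 1) (hm : m ≤ 0) :
    ContinuousPeriod n m data = ContinuousPeriod_alt n m data := by
  subst hn
  rw [ContinuousPeriod, ContinuousPeriod_alt]
  rw [show ((1 : Int) + 1) = 2 by norm_num]
  rw [PySem.List.pyRange_one_cons (by norm_num), PySem.List.pyRange_one_eq_nil (by norm_num)]
  rw [PySem.List.pyRange_one_cons (by norm_num), PySem.List.pyRange_one_eq_nil (by norm_num)]
  simp only [List.foldl_cons, List.foldl_nil]
  rw [pvStepA]
  simp only
  rw [if_pos (by norm_num : (1 : Int) ≤ 1)]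
  rw [show ((1 : Int) - 1) = 0 by norm_num]
  rw [if_neg (by rw [pvCGet_set_self]; omega)]
  rw [show ((1 : Int) - 0).toNat = 0 + 1 by norm_num]
  rw [pvScanB]
  simp only
  rw [if_pos (by norm_num : (0 : Int) < 1)]
  rw [if_pos (by rw [pvCBump, pvCGet_replicate, pvCGet_set_self]; omega)]
  norm_num

theorem pvNeg (n m : Int) (data : List Int) (hn : n ≤ 0) :
    ContinuousPeriod n m data = ContinuousPeriod_alt n m data := by
  rw [ContinuousPeriod, ContinuousPeriod_alt]
  rw [PySem.List.pyRange_one_eq_nil (show n + 1 ≤ (1 : Int) by omega)]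
  rw [PySem.List.pyRange_one_eq_nil (show n ≤ (0 : Int) by omega)]
  simp

-- ---- the m ≤ 0 regime (for the tightness theorem): B returns the full count, A overshoots ----

-- the sum (n - a) + (n - (a+1)) + … + (n - (N-1)) of B's contributions when m ≤ 0
def pvTS (n : Int) (N a : Nat) : Int :=
  if a < N then (n - (a : Int)) + pvTS n N (a + 1) else 0
termination_by N - a

theorem pvCGet_bump_self (c : List Int) (x d : Int) (hlen : c.length = 10) :
    pvCGet (pvCBump c x d) x = pvCGet c x + d := by
  unfold pvCBump pvCGet
  exact pvGetD_set_self c (pvDig x) _ (by rw [hlen]; exact pvDig_lt x)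

-- counter relation in the m ≤ 0 regime: cnt[v] = C(0,hn,v) - C(0,a,v)
theorem pvRepZ_dec (data : List Int) (hn a : Nat) (cnt : List Int) (ha : a < data.length)
    (h : pvRep cnt (fun v => (pvCnt data 0 hn v : Int) - pvCnt data 0 a v)) :
    pvRep (pvCBump cnt (data.getD a 0) (-1))
      (fun v => (pvCnt data 0 hn v : Int) - pvCnt data 0 (a + 1) v) := by
  have hb := pvRep_bump cnt _ h (data.getD a 0) (-1)
  refine ⟨hb.1, ?_⟩
  intro v hv
  rw [hb.2 v hv]
  beta_reduce
  rw [pvCnt_succ data 0 a v (by omega) ha]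
  by_cases hvx : v = pvDig (data.getD a 0)
  · rw [if_pos hvx, if_pos hvx.symm, hvx]
    push_cast; ring
  · rw [if_neg hvx, if_neg (fun hh => hvx hh.symm)]
    push_cast; ring

theorem pvRepZ_inc (data : List Int) (q a : Nat) (cnt : List Int) (hq : q < data.length)
    (h : pvRep cnt (fun v => (pvCnt data 0 q v : Int) - pvCnt data 0 a v)) :
    pvRep (pvCBump cnt (data.getD q 0) 1)
      (fun v => (pvCnt data 0 (q + 1) v : Int) - pvCnt data 0 a v) := by
  have hb := pvRep_bump cnt _ h (data.getD q 0) 1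
  refine ⟨hb.1, ?_⟩
  intro v hv
  rw [hb.2 v hv]
  beta_reduce
  rw [pvCnt_succ data 0 q v (by omega) hq]
  by_cases hvx : v = pvDig (data.getD q 0)
  · rw [if_pos hvx, if_pos hvx.symm, hvx]
    push_cast; ring
  · rw [if_neg hvx, if_neg (fun hh => hvx hh.symm)]
    push_cast; ring

-- the freshly seen element's counter equals 1 under the m ≤ 0 counter relation
theorem pvSelf_one (data : List Int) (a : Nat) (ha : a < data.length) :
    (pvCnt data 0 (a + 1) (pvDig (data.getD a 0)) : Int)
      - pvCnt data 0 a (pvDig (data.getD a 0)) = 1 := by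
  rw [pvCnt_succ data 0 a _ (by omega) ha, if_pos rfl]
  push_cast; ring

-- A's inner while loop for m ≤ 0: it breaks at latest at the first undecremented position
theorem pvAdvNeg (n m : Int) (data : List Int) (N : Nat) (hN : (N : Int) = n)
    (hlen : N ≤ data.length) (hm : m ≤ 0) :
    ∀ (fuel : Nat) (h0 a : Nat) (cnt : List Int), h0 ≤ a → a < N → a + 1 - h0 ≤ fuel →
      pvRep cnt (fun v => (pvCnt data 0 h0 v : Int) - pvCnt data 0 a v) →
      ∃ cnt' h', pvAdvA n m data fuel cnt ((h0 : Int) + 1) = (cnt', ((h' : Nat) : Int))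
        ∧ h0 < h' ∧ h' ≤ a + 1
        ∧ pvRep cnt' (fun v => (pvCnt data 0 h' v : Int) - pvCnt data 0 a v) := by
  intro fuel
  induction fuel with
  | zero => intro h0 a cnt hha haN hfuel hrep; omega
  | succ fuel ih =>
    intro h0 a cnt hha haN hfuel hrep
    have hcond : ((h0 : Int) + 1) ≤ n := by rw [← hN]; push_cast; omega
    have hidx : ((h0 : Int) + 1 - 1) = ((h0 : Nat) : Int) := by ring
    have hq : h0 < data.length := by omega
    rw [pvAdvA, if_pos hcond, hidx, pvDGet_natCast]
    have hrep' := pvRepZ_inc data h0 a cnt hq hrep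
    have hval : pvCGet (pvCBump cnt (data.getD h0 0) 1) (data.getD h0 0)
        = (pvCnt data 0 (h0 + 1) (pvDig (data.getD h0 0)) : Int)
          - pvCnt data 0 a (pvDig (data.getD h0 0)) := pvRep_get _ _ hrep' _
    by_cases hbr : m ≤ pvCGet (pvCBump cnt (data.getD h0 0) 1) (data.getD h0 0)
    · rw [if_pos hbr]
      exact ⟨_, h0 + 1, by push_cast; rfl, by omega, by omega, hrep'⟩
    · rw [if_neg hbr]
      have hne : h0 ≠ a := by
        intro he
        subst he
        rw [hval, pvSelf_one data h0 (by omega)] at hbr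
        omega
      obtain ⟨cnt', h', heq, hgt, hle, hrep''⟩ := ih (h0 + 1) a
        (pvCBump cnt (data.getD h0 0) 1) (by omega) haN (by omega) hrep'
      refine ⟨cnt', h', ?_, by omega, hle, hrep''⟩
      rw [← heq]
      congr 1

-- A's loop for m ≤ 0: every iteration contributes at least n - low + 1
theorem pvFoldNeg (n m : Int) (data : List Int) (N : Nat) (hN : (N : Int) = n)
    (hlen : N ≤ data.length) (hm : m ≤ 0) :
    ∀ (k a hn : Nat) (res : Int) (cnt : List Int), k = N - a → a ≤ N → 1 ≤ hn →
      hn ≤ a + 1 → hn ≤ N →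
      pvRep cnt (fun v => (pvCnt data 0 hn v : Int) - pvCnt data 0 a v) →
      res + pvTS n N a ≤
        ((PySem.List.pyRange ((a : Int) + 1) (n + 1) 1).foldl (pvStepA n m data)
          (res, cnt, ((hn : Nat) : Int))).1 := by
  intro k
  induction k with
  | zero =>
    intro a hn res cnt hk haN h1hn hhna hhnN hrep
    have haN' : a = N := by omega
    rw [PySem.List.pyRange_one_eq_nil (by rw [← hN]; push_cast; omega)]
    rw [pvTS, if_neg (by omega)]
    simp
  | succ k ih =>
    intro a hn res cnt hk haN h1hn hhna hhnN hrep
    have haltN : a < N := by omega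
    rw [PySem.List.pyRange_one_cons (by rw [← hN]; push_cast; omega)]
    rw [List.foldl_cons]
    have hcond : ((hn : Nat) : Int) ≤ n := by rw [← hN]; exact_mod_cast hhnN
    have hidx : (((hn : Nat) : Int) - 1) = (((hn - 1 : Nat) : Nat) : Int) := by
      push_cast [Nat.cast_sub h1hn]; ring
    have hcast : ((a : Int) + 1 + 1) = (((a + 1 : Nat) : Int) + 1) := by push_cast; ring
    have hread : pvCGet cnt (pvDGet data (((hn : Nat) : Int) - 1))
        = (pvCnt data 0 hn (pvDig (data.getD (hn - 1) 0)) : Int)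
          - pvCnt data 0 a (pvDig (data.getD (hn - 1) 0)) := by
      rw [hidx, pvDGet_natCast]
      exact pvRep_get _ _ hrep _
    have hadec : a < data.length := by omega
    by_cases hfire : pvCGet cnt (pvDGet data (((hn : Nat) : Int) - 1)) < m
    · -- the advance runs: only possible while hn ≤ a, and it stops by position a
      have hhna' : hn ≤ a := by
        by_contra hc
        have he : hn = a + 1 := by omega
        rw [hread, he, show a + 1 - 1 = a by omega, pvSelf_one data a hadec] at hfire
        omega
      obtain ⟨cnt', h', heq, hgt, hle, hrep'⟩ := pvAdvNeg n m data N hN hlen hm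
        (n + 1 - ((hn : Nat) : Int)).toNat hn a cnt hhna' haltN (by rw [← hN]; omega) hrep
      have hstep : pvStepA n m data (res, cnt, ((hn : Nat) : Int)) ((a : Int) + 1)
          = (res + (n - ((h' : Nat) : Int) + 1),
             pvCBump cnt' (pvDGet data ((a : Int) + 1 - 1)) (-1), ((h' : Nat) : Int)) := by
        rw [pvStepA]
        simp only [if_pos hcond, if_pos hfire, heq]
      rw [hstep]
      have hrepd : pvRep (pvCBump cnt' (pvDGet data ((a : Int) + 1 - 1)) (-1))
          (fun v => (pvCnt data 0 h' v : Int) - pvCnt data 0 (a + 1) v) := by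
        rw [show ((a : Int) + 1 - 1) = ((a : Nat) : Int) by ring, pvDGet_natCast]
        exact pvRepZ_dec data h' a cnt' hadec hrep'
      have hrec := ih (a + 1) h' (res + (n - ((h' : Nat) : Int) + 1))
        (pvCBump cnt' (pvDGet data ((a : Int) + 1 - 1)) (-1)) (by omega) (by omega)
        (by omega) (by omega) (by omega) hrepd
      rw [hcast]
      refine le_trans ?_ hrec
      rw [pvTS, if_pos haltN]
      have : n - ((h' : Nat) : Int) + 1 ≥ n - (a : Int) := by
        have : ((h' : Nat) : Int) ≤ (a : Int) + 1 := by exact_mod_cast hle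
        omega
      omega
    · -- no advance: high stays put (and high ≤ low)
      have hstep : pvStepA n m data (res, cnt, ((hn : Nat) : Int)) ((a : Int) + 1)
          = (res + (n - ((hn : Nat) : Int) + 1),
             pvCBump cnt (pvDGet data ((a : Int) + 1 - 1)) (-1), ((hn : Nat) : Int)) := by
        rw [pvStepA]
        simp only [if_pos hcond, if_neg hfire]
      rw [hstep]
      have hrepd : pvRep (pvCBump cnt (pvDGet data ((a : Int) + 1 - 1)) (-1))
          (fun v => (pvCnt data 0 hn v : Int) - pvCnt data 0 (a + 1) v) := by
        rw [show ((a : Int)+ 1 - 1) = ((a : Nat) : Int) by ring, pvDGet_natCast]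
        exact pvRepZ_dec data hn a cnt hadec hrep
      have hrec := ih (a + 1) hn (res + (n - ((hn : Nat) : Int) + 1))
        (pvCBump cnt (pvDGet data ((a : Int) + 1 - 1)) (-1)) (by omega) (by omega)
        (by omega) (by omega) (by omega) hrepd
      rw [hcast]
      refine le_trans ?_ hrec
      rw [pvTS, if_pos haltN]
      have : n - ((hn : Nat) : Int) + 1 ≥ n - (a : Int) := by
        have : ((hn : Nat) : Int) ≤ (a : Int) + 1 := by exact_mod_cast hhna
        omega
      omega

-- B's value for m ≤ 0: every start breaks at once, summing n - a over all starts
theorem pvAltNeg (n m : Int) (data : List Int) (N : Nat) (hN : (N : Int) = n)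
    (hm : m ≤ 0) :
    ∀ (k a : Nat) (res : Int), k = N - a → a ≤ N →
      ((PySem.List.pyRange ((a : Nat) : Int) n 1).foldl
          (fun res i => res + pvScanB n m data (n - i).toNat (List.replicate 10 (0 : Int)) i) res)
        = res + pvTS n N a := by
  intro k
  induction k with
  | zero =>
    intro a res hk haN
    rw [PySem.List.pyRange_one_eq_nil (by rw [← hN]; push_cast; omega)]
    rw [pvTS, if_neg (by omega)]
    simp
  | succ k ih =>
    intro a res hk haN
    have haltN : a < N := by omega
    rw [PySem.List.pyRange_one_cons (by rw [← hN]; push_cast; omega)]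
    rw [List.foldl_cons]
    obtain ⟨f, hf⟩ : ∃ f, (n - ((a : Nat) : Int)).toNat = f + 1 := ⟨(N - a) - 1, by omega⟩
    have hscan : pvScanB n m data (n - ((a : Nat) : Int)).toNat (List.replicate 10 (0 : Int))
        ((a : Nat) : Int) = n - ((a : Nat) : Int) := by
      rw [hf, pvScanB, if_pos (by rw [← hN]; exact_mod_cast haltN)]
      rw [if_pos (by rw [pvCGet_bump_self _ _ _ (by simp), pvCGet_replicate]; omega)]
    rw [hscan]
    have hcast : ((a : Int) + 1) = (((a + 1 : Nat) : Nat) : Int) := by push_cast; ring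
    rw [hcast, ih (a + 1) (res + (n - ((a : Nat) : Int))) (by omega) (by omega)]
    conv_rhs => rw [pvTS]
    rw [if_pos haltN]
    ring

theorem pvRep_seed (data : List Int) (h0 : 0 < data.length) :
    pvRep ((List.replicate 10 (0 : Int)).set (pvDig (pvDGet data 0)) 1)
      (fun v => (pvCnt data 0 1 v : Int)) := by
  have hd0 : pvDGet data 0 = data.getD 0 0 := by simp [pvDGet]
  refine ⟨by simp, ?_⟩
  intro v hv
  beta_reduce
  have hcnt : pvCnt data 0 1 v
      = (if pvDig (data.getD 0 0) = v then 1 else 0) + pvCnt data 1 1 v :=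
    pvCnt_drop_head data 0 1 v (by omega) (by omega)
  rw [pvCnt_empty data 1 1 v le_rfl] at hcnt
  rw [hcnt, hd0]
  by_cases hvx : v = pvDig (data.getD 0 0)
  · rw [hvx, if_pos rfl]
    rw [pvGetD_set_self _ _ _ (by simp [pvDig_lt])]
    norm_num
  · rw [if_neg (fun h => hvx h.symm)]
    rw [pvGetD_set_ne _ _ _ _ (fun h => hvx h.symm)]
    have h0 := (pvRep_fresh data 0).2 v hv
    rw [show (fun v => ((pvCnt data 0 0 v : Nat) : Int)) v = ((pvCnt data 0 0 v : Nat) : Int) from rfl,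
      pvCnt_empty data 0 0 v le_rfl] at h0
    simpa using h0

-- ===== VERDICT (by name: the statement is the Claim_ definition above) =====
theorem ContinuousPeriod_spec : Claim_unchanged_ContinuousPeriod := by
  intro n m data _hdom hpre hnd
  show ContinuousPeriod n m data = ContinuousPeriod_alt n m data
  by_cases h0 : n ≤ 0
  · exact pvNeg n m data h0
  · by_cases hm : m ≤ 0
    · have hn1 : n = 1 := by
        unfold D_ContinuousPeriod at hnd
        omega
      exact pvSmall n m data hn1 hm
    · exact pvMain n m data (by omega) (by omega) hpre

theorem ContinuousPeriod_changed : Claim_changed_ContinuousPeriod := by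
  unfold Claim_changed_ContinuousPeriod; decide

theorem ContinuousPeriod_tight : Claim_exact_ContinuousPeriod := by
  intro n m data _hdom hpre hd
  obtain ⟨hm0, hn2⟩ := hd
  obtain ⟨hne, hlenI, _hrange⟩ := hpre
  have hN : ((n.toNat : Nat) : Int) = n := by omega
  have hlen : n.toNat ≤ data.length := by omega
  have hN2 : 2 ≤ n.toNat := by omega
  have hd0 : pvDGet data 0 = data.getD 0 0 := by simp [pvDGet]
  have hB : ContinuousPeriod_alt n m data = pvTS n n.toNat 0 := by
    rw [ContinuousPeriod_alt]
    have h := pvAltNeg n m data n.toNat hN hm0 n.toNat 0 0 (by omega) (by omega)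
    simpa using h
  have hseed : pvRep ((List.replicate 10 (0 : Int)).set (pvDig (pvDGet data 0)) 1)
      (fun v => (pvCnt data 0 1 v : Int) - pvCnt data 0 0 v) := by
    have hs := pvRep_seed data (by omega)
    refine ⟨hs.1, ?_⟩
    intro v hv
    rw [hs.2 v hv]
    beta_reduce
    rw [pvCnt_empty data 0 0 v le_rfl]
    push_cast
    ring
  have hAeq : ContinuousPeriod n m data
      = ((PySem.List.pyRange 1 (n + 1) 1).foldl (pvStepA n m data)
          (0, (List.replicate 10 (0 : Int)).set (pvDig (pvDGet data 0)) 1, 1)).1 := rfl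
  have hstep1 : pvStepA n m data
      (0, (List.replicate 10 (0 : Int)).set (pvDig (pvDGet data 0)) 1, 1) 1
      = (0 + (n - 1 + 1),
         pvCBump ((List.replicate 10 (0 : Int)).set (pvDig (pvDGet data 0)) 1)
           (pvDGet data 0) (-1), 1) := by
    rw [pvStepA]
    simp only
    rw [show ((1 : Int) - 1) = 0 by norm_num]
    rw [if_pos (show (1 : Int) ≤ n by omega)]
    rw [if_neg (by rw [pvCGet_set_self]; omega)]
  have hlen10 : (pvCBump ((List.replicate 10 (0 : Int)).set (pvDig (pvDGet data 0)) 1)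
      (pvDGet data 0) (-1)).length = 10 := by
    simp [pvCBump]
  have hstep2 : pvStepA n m data
      (0 + (n - 1 + 1),
       pvCBump ((List.replicate 10 (0 : Int)).set (pvDig (pvDGet data 0)) 1)
         (pvDGet data 0) (-1), 1) (1 + 1)
      = (0 + (n - 1 + 1) + (n - 1 + 1),
         pvCBump (pvCBump ((List.replicate 10 (0 : Int)).set (pvDig (pvDGet data 0)) 1)
             (pvDGet data 0) (-1)) (pvDGet data (1 + 1 - 1)) (-1), 1) := by
    rw [pvStepA]
    simp only
    rw [show ((1 : Int) - 1) = 0 by norm_num]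
    rw [if_pos (show (1 : Int) ≤ n by omega)]
    rw [if_neg (by
      rw [pvCGet_bump_self _ _ _ (by simp), pvCGet_set_self]
      omega)]
  have hrep2 : pvRep
      (pvCBump (pvCBump ((List.replicate 10 (0 : Int)).set (pvDig (pvDGet data 0)) 1)
          (pvDGet data 0) (-1)) (pvDGet data (1 + 1 - 1)) (-1))
      (fun v => (pvCnt data 0 1 v : Int) - pvCnt data 0 2 v) := by
    rw [show ((1 : Int) + 1 - 1) = ((1 : Nat) : Int) by norm_num, pvDGet_natCast]
    refine pvRepZ_dec data 1 1 _ (by omega) ?_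
    have h1 := pvRepZ_dec data 1 0 _ (by omega) hseed
    rw [← hd0] at h1
    exact h1
  have hfold := pvFoldNeg n m data n.toNat hN hlen hm0 (n.toNat - 2) 2 1
    (0 + (n - 1 + 1) + (n - 1 + 1))
    (pvCBump (pvCBump ((List.replicate 10 (0 : Int)).set (pvDig (pvDGet data 0)) 1)
        (pvDGet data 0) (-1)) (pvDGet data (1 + 1 - 1)) (-1))
    (by omega) (by omega) (by omega) (by omega) (by omega) hrep2
  have hA : 0 + (n - 1 + 1) + (n - 1 + 1) + pvTS n n.toNat 2 ≤ ContinuousPeriod n m data := by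
    rw [hAeq]
    rw [PySem.List.pyRange_one_cons (show (1 : Int) < n + 1 by omega)]
    rw [PySem.List.pyRange_one_cons (show (1 : Int) + 1 < n + 1 by omega)]
    rw [List.foldl_cons, List.foldl_cons, hstep1, hstep2]
    rw [show ((1 : Int) + 1 + 1) = (((2 : Nat) : Int) + 1) by norm_num]
    simpa using hfold
  rw [hB]
  have hTS : pvTS n n.toNat 0 = (n - ((0 : Nat) : Int)) + ((n - ((1 : Nat) : Int))
      + pvTS n n.toNat 2) := by
    rw [pvTS, if_pos (by omega), pvTS, if_pos (by omega)]
  intro heq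
  rw [heq, hTS] at hA
  push_cast at hA
  omega
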